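-- pv_equiv track=rewrite | github.com/nematollahi-m/HRP-by-Reinforcement-Learning | Archive/main_branch/Q.py | extract_possible_actions_list
-- ===== SOURCE A (Python) =====
-- from itertools import product
--
-- def extract_possible_actions_list(state_key):
--     '''
--         Extracts possible number of actions given current state
--         Args:
--             state_key:          The key of the state
--         Returns:
--             List of possible actions for the next step.
--     '''
--     w = state_key[:-1]
--     A = sum(w)
--     remain = _total_allowed - A
--
--     track = []
--     for r in range(remain + 1):
--         track.append(r)
--     cc = product(track, repeat=_num_knowledge_level)
--     G = list(cc)
--     possible_action_list = []
--
--     for i in G: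
--         if sum(i) > remain:
--             continue
--         else:
--             possible_action_list.append(i)
--     return possible_action_list
--
-- _num_knowledge_level = 2
--
-- _total_allowed = 10
-- ===== SOURCE B (Python) =====
-- _num_knowledge_level = 2
-- _total_allowed = 10
--
-- def extract_possible_actions_list(state_key):
--     remain = _total_allowed - sum(state_key[:-1])
--     out = []
--     for i in range(remain + 1):
--         for j in range(remain + 1 - i):
--             out.append((i, j))
--     return out
-- ===== Notes on version B (the rewrite author's own statement) =====
-- stated objective: simpler
-- what changed: B enumerates only the valid (i, j) pairs directly with a pruned inner range instead of materialising the full Cartesian product and filtering it by sum.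
import Mathlib
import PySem

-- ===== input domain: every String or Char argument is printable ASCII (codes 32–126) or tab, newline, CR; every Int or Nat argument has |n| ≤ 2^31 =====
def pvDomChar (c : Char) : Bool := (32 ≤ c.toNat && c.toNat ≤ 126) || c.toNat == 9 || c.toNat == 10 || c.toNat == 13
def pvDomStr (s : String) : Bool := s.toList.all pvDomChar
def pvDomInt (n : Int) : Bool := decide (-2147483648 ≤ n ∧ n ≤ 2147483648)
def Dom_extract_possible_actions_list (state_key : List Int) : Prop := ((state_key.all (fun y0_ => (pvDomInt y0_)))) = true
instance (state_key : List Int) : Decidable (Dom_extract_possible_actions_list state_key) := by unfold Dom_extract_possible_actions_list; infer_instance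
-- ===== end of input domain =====

-- B replaces A's full Cartesian product + sum filter by direct enumeration of the
-- valid pairs with a pruned inner range (objective: simpler).

-- ===== PORT A =====
-- w = state_key[:-1]; remain = 10 - sum(w); track = [0..remain];
-- G = product(track, repeat=2); filter by sum(i) <= remain.
def extract_possible_actions_list (state_key : List Int) : List (Int × Int) :=
  let w := PySem.List.slice state_key none (some (-1))
  let A := w.sum
  let remain := (10 : Int) - A
  let track := (PySem.List.pyRange 0 (remain + 1) 1).foldl (fun acc r => acc ++ [r]) []
  let G := track.flatMap (fun a => track.map (fun b => (a, b)))
  G.foldl (fun acc i => if i.1 + i.2 > remain then acc else acc ++ [i]) []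

-- ===== PORT B =====
def extract_possible_actions_list_alt (state_key : List Int) : List (Int × Int) :=
  let remain := (10 : Int) - (PySem.List.slice state_key none (some (-1))).sum
  (PySem.List.pyRange 0 (remain + 1) 1).foldl
    (fun out i =>
      (PySem.List.pyRange 0 (remain + 1 - i) 1).foldl (fun out2 j => out2 ++ [(i, j)]) out)
    []

-- ===== PRECONDITION & SPEC =====
def Spec_extract_possible_actions_list (state_key : List Int) (out : List (Int × Int)) : Prop := out = extract_possible_actions_list_alt state_key
instance (state_key : List Int) (out : List (Int × Int)) : Decidable (Spec_extract_possible_actions_list state_key out) := by unfold Spec_extract_possible_actions_list; infer_instance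

-- ===== CLAIM (what is proved, stated in full; the proofs are below) =====
def Claim_equal_extract_possible_actions_list : Prop := ∀ (state_key : List Int), Dom_extract_possible_actions_list state_key → Spec_extract_possible_actions_list state_key (extract_possible_actions_list state_key)

-- ===== LEMMAS AND PROOFS =====

-- A's filtering foldl is List.filter
theorem foldl_filter {α : Type} (p : α → Prop) [DecidablePred p] (l acc : List α) :
    l.foldl (fun a i => if p i then a else a ++ [i]) acc
      = acc ++ l.filter (fun i => !(decide (p i))) := by
  induction l generalizing acc with
  | nil => simp
  | cons x xs ih =>
    by_cases h : p x <;> simp [List.foldl_cons, h, ih, List.append_assoc]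

-- filtering a range by an upper bound prunes it
theorem filter_pyRange_lt (a b c : Int) (hcb : c ≤ b) :
    (PySem.List.pyRange a b 1).filter (fun x => decide (x < c))
      = PySem.List.pyRange a c 1 := by
  by_cases hab : b ≤ a
  · rw [PySem.List.pyRange_one_eq_nil hab, PySem.List.pyRange_one_eq_nil (le_trans hcb hab)]
    simp
  · push_neg at hab
    rw [PySem.List.pyRange_one_cons hab]
    by_cases hac : a < c
    · rw [PySem.List.pyRange_one_cons hac]
      have := filter_pyRange_lt (a + 1) b c hcb
      simp [hac, this]
    · rw [not_lt] at hac
      rw [PySem.List.pyRange_one_eq_nil hac]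
      simp only [List.filter_cons]
      have h1 : ¬ (a < c) := not_lt.mpr hac
      simp only [h1, decide_false]
      apply List.filter_eq_nil_iff.mpr
      intro x hx
      have := (PySem.List.mem_pyRange_one).mp hx
      simp
      omega
termination_by (b - a).toNat
decreasing_by omega

-- ===== VERDICT (by name: the statement is the Claim_ definition above) =====
theorem extract_possible_actions_list_spec : Claim_equal_extract_possible_actions_list := by
  intro state_key _
  unfold Spec_extract_possible_actions_list extract_possible_actions_list extract_possible_actions_list_alt
  simp only [PySem.List.foldl_append_singleton_eq_map, List.map_id', List.nil_append,
    foldl_filter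
      (fun i : Int × Int =>
        i.1 + i.2 > (10 : Int) - (PySem.List.slice state_key none (some (-1))).sum)]
  set remain := (10 : Int) - (PySem.List.slice state_key none (some (-1))).sum with hr
  rw [PySem.List.foldl_append_eq_flatMap
        (fun i => List.map (Prod.mk i) (PySem.List.pyRange 0 (remain + 1 - i) 1))]
  simp only [List.nil_append, List.filter_flatMap]
  apply List.flatMap_congr
  intro a ha
  have ha' := (PySem.List.mem_pyRange_one).mp ha
  rw [List.filter_map]
  have : ((fun i : Int × Int => !decide (remain < i.1 + i.2)) ∘ fun b => (a, b))
       = fun x : Int => decide (x < remain + 1 - a) := by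
    funext x
    by_cases hx : x < remain + 1 - a <;> simp [hx] <;> omega
  rw [this, filter_pyRange_lt _ _ _ (by omega)]
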